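-- pv_equiv track=rewrite | github.com/mich-koz/Optymalizacja | lab2/M_Kozyra_Hetmani.py | hetmani
-- ===== SOURCE A (Python) =====
-- def pole(i, j):
--     result = "x"
--     result += str(i)
--     result += "_"
--     result += str(j)
--     return result
--
-- def hetmani(n):
--
--     result = "Maximize \nobj: "
--     for i in range(1, n + 1):
--         for j in range(1, n + 1):
--             result += pole(i, j)
--             if(not(i == n and j == n)):
--                 result += " + "
--             else:
--                 result += "\n"
--
--
--
--     result += "Subject to \n"
--     for i in range(1, n + 1):
--         for j in range(1, n + 1):
--             result += pole(i, j)
--             if(not(j == n)):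
--                 result += " + "
--             else:
--                 result += " <= 1\n"
--
--     for i in range(1, n + 1):
--         for j in range(1, n + 1):
--             result += pole(j, i)
--             if(not(j == n)):
--                 result += " + "
--             else:
--                 result += " <= 1\n"
--
--
--
--     for i in range(-n + 1, n):
--         if (i <= 0):
--             for j in range(1, n+i+1):
--                 result += pole(j, j - i)
--                 if (j != n+i):
--                     result += " + "
--         else:
--             for j in range(i + 1, n + 1):
--                 result += pole(j, j-i)
--                 if (j != n):
--                     result += " + "
--         result += " <= 1\n"
--     for i in range(-n+1, n):
--         if (i <= 0):
--             for j in range(1, n+i+1):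
--                 result += pole(j, i-j+n+1)
--                 if (j != n+i):
--                     result += " + "
--         else:
--             for j in range(i + 1 , n + 1):
--                 result += pole(j, i-j+n+1)
--                 if (j != n):
--                     result += " + "
--         result += " <= 1\n"
--
--
--     #wartosci
--     result += "Bounds \n"
--     for i in range(1, n + 1):
--         for j in range(1, n + 1):
--             result += "0 <= "
--             result += pole(i, j)
--             result += " <= 1\n"
--
--     #nazwy zmiennych
--     result += "Generals \n"
--     for i in range(1, n + 1):
--         for j in range(1, n + 1):
--             result += pole(i, j)
--             result += "\n"
--     result += "End"
--     return result
-- ===== SOURCE B (Python) =====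
-- def hetmani(n):
--     # One pass over all cells, grouping names per row/column/diagonal key in dicts,
--     # then emit every section with str.join.
--     cells = []
--     rows = {}
--     cols = {}
--     diag = {}
--     anti = {}
--     for r in range(1, n + 1):
--         for c in range(1, n + 1):
--             name = "x" + str(r) + "_" + str(c)
--             cells.append(name)
--             rows.setdefault(r, []).append(name)
--             cols.setdefault(c, []).append(name)
--             diag.setdefault(r - c, []).append(name)
--             anti.setdefault(r + c, []).append(name)
--     out = ["Maximize \nobj: "]
--     if cells:
--         out.append(" + ".join(cells) + "\n")
--     out.append("Subject to \n")
--     for r in sorted(rows):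
--         out.append(" + ".join(rows[r]) + " <= 1\n")
--     for c in sorted(cols):
--         out.append(" + ".join(cols[c]) + " <= 1\n")
--     for d in sorted(diag):
--         out.append(" + ".join(diag[d]) + " <= 1\n")
--     for s in sorted(anti):
--         out.append(" + ".join(anti[s]) + " <= 1\n")
--     out.append("Bounds \n")
--     for name in cells:
--         out.append("0 <= " + name + " <= 1\n")
--     out.append("Generals \n")
--     for name in cells:
--         out.append(name + "\n")
--     out.append("End")
--     return "".join(out)
-- ===== Notes on version B (the rewrite author's own statement) =====
-- stated objective: simpler
-- what changed: A builds the LP text with ten index-driven accumulating loops (separate i<=0/i>0 diagonal branches and last-element special-casing); B makes one pass over all cells grouping names into dicts keyed by row, column, r-c and r+c, then emits every section with ' + '.join over the sorted group keys.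
import Mathlib
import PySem

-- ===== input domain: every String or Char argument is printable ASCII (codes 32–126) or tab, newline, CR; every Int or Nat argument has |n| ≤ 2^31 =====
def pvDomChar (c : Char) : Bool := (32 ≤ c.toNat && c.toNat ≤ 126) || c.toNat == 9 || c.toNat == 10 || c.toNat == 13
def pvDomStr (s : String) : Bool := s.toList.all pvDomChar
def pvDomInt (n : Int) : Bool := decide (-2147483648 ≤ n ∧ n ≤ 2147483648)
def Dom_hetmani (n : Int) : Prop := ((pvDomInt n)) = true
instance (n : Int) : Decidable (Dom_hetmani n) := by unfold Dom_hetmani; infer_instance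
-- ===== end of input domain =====

-- B replaces A's ten accumulating loops by one grouping pass over all cells (dicts keyed by
-- row/column/r-c/r+c) followed by str.join emission; same output, different decomposition.


-- ===== PORT A =====
def pole (i j : Int) : String :=
  let result := "x"
  let result := result ++ PySem.Int.toStr i
  let result := result ++ "_"
  let result := result ++ PySem.Int.toStr j
  result

def hetmani (n : Int) : String :=
  let result := "Maximize \nobj: "
  let result := (PySem.List.pyRange 1 (n+1)).foldl (fun result i =>
    (PySem.List.pyRange 1 (n+1)).foldl (fun result j =>
      let result := result ++ pole i j
      if !(i == n && j == n) then result ++ " + " else result ++ "\n") result) result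
  let result := result ++ "Subject to \n"
  let result := (PySem.List.pyRange 1 (n+1)).foldl (fun result i =>
    (PySem.List.pyRange 1 (n+1)).foldl (fun result j =>
      let result := result ++ pole i j
      if !(j == n) then result ++ " + " else result ++ " <= 1\n") result) result
  let result := (PySem.List.pyRange 1 (n+1)).foldl (fun result i =>
    (PySem.List.pyRange 1 (n+1)).foldl (fun result j =>
      let result := result ++ pole j i
      if !(j == n) then result ++ " + " else result ++ " <= 1\n") result) result
  let result := (PySem.List.pyRange (-n+1) n).foldl (fun result i =>
    (if i ≤ 0 then
      (PySem.List.pyRange 1 (n+i+1)).foldl (fun result j =>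
        let result := result ++ pole j (j - i)
        if j != n + i then result ++ " + " else result) result
     else
      (PySem.List.pyRange (i+1) (n+1)).foldl (fun result j =>
        let result := result ++ pole j (j - i)
        if j != n then result ++ " + " else result) result) ++ " <= 1\n") result
  let result := (PySem.List.pyRange (-n+1) n).foldl (fun result i =>
    (if i ≤ 0 then
      (PySem.List.pyRange 1 (n+i+1)).foldl (fun result j =>
        let result := result ++ pole j (i - j + n + 1)
        if j != n + i then result ++ " + " else result) result
     else
      (PySem.List.pyRange (i+1) (n+1)).foldl (fun result j =>
        let result := result ++ pole j (i - j + n + 1)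
        if j != n then result ++ " + " else result) result) ++ " <= 1\n") result
  let result := result ++ "Bounds \n"
  let result := (PySem.List.pyRange 1 (n+1)).foldl (fun result i =>
    (PySem.List.pyRange 1 (n+1)).foldl (fun result j =>
      result ++ "0 <= " ++ pole i j ++ " <= 1\n") result) result
  let result := result ++ "Generals \n"
  let result := (PySem.List.pyRange 1 (n+1)).foldl (fun result i =>
    (PySem.List.pyRange 1 (n+1)).foldl (fun result j =>
      result ++ pole i j ++ "\n") result) result
  result ++ "End"

-- ===== PORT B =====
-- One pass over all cells grouping names into per-row/column/diagonal dicts, then joins.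
-- (Python's rows[r] lookup is ported as getD r [] — exact here, since every iterated key is present.)
def hetmani_alt (n : Int) : String :=
  let st := (PySem.List.pyRange 1 (n+1)).foldl (fun st r =>
    (PySem.List.pyRange 1 (n+1)).foldl (fun st c =>
      let name := "x" ++ PySem.Int.toStr r ++ "_" ++ PySem.Int.toStr c
      (st.1 ++ [name],
       st.2.1.modify r [] (· ++ [name]),
       st.2.2.1.modify c [] (· ++ [name]),
       st.2.2.2.1.modify (r - c) [] (· ++ [name]),
       st.2.2.2.2.modify (r + c) [] (· ++ [name]))) st)
    (([], PySem.Dict.empty, PySem.Dict.empty, PySem.Dict.empty, PySem.Dict.empty) :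
      List String × PySem.Dict Int (List String) × PySem.Dict Int (List String) ×
        PySem.Dict Int (List String) × PySem.Dict Int (List String))
  let cells := st.1
  let out := ["Maximize \nobj: "]
  let out := if !cells.isEmpty then out ++ [PySem.Str.join " + " cells ++ "\n"] else out
  let out := out ++ ["Subject to \n"]
  let out := (PySem.List.sorted st.2.1.keys (fun x => x)).foldl
    (fun out r => out ++ [PySem.Str.join " + " (st.2.1.getD r []) ++ " <= 1\n"]) out
  let out := (PySem.List.sorted st.2.2.1.keys (fun x => x)).foldl
    (fun out c => out ++ [PySem.Str.join " + " (st.2.2.1.getD c []) ++ " <= 1\n"]) out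
  let out := (PySem.List.sorted st.2.2.2.1.keys (fun x => x)).foldl
    (fun out d => out ++ [PySem.Str.join " + " (st.2.2.2.1.getD d []) ++ " <= 1\n"]) out
  let out := (PySem.List.sorted st.2.2.2.2.keys (fun x => x)).foldl
    (fun out s => out ++ [PySem.Str.join " + " (st.2.2.2.2.getD s []) ++ " <= 1\n"]) out
  let out := out ++ ["Bounds \n"]
  let out := cells.foldl (fun out name => out ++ ["0 <= " ++ name ++ " <= 1\n"]) out
  let out := out ++ ["Generals \n"]
  let out := cells.foldl (fun out name => out ++ [name ++ "\n"]) out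
  let out := out ++ ["End"]
  PySem.Str.join "" out

-- ===== PRECONDITION & SPEC =====
def Spec_hetmani (n : Int) (out : String) : Prop := out = hetmani_alt n
instance (n : Int) (out : String) : Decidable (Spec_hetmani n out) := by unfold Spec_hetmani; infer_instance

-- ===== CLAIM (what is proved, stated in full; the proofs are below) =====
def Claim_equal_hetmani : Prop := ∀ (n : Int), Dom_hetmani n → Spec_hetmani n (hetmani n)

-- ===== LEMMAS AND PROOFS =====

-- string-join helpers (proof-only)
def cat : List String → String
  | [] => ""
  | x :: t => x ++ cat t

def jstr (sep : String) : List String → String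
  | [] => ""
  | [x] => x
  | x :: y :: t => x ++ sep ++ jstr sep (y :: t)

def pairsP (n : Int) : List (Int × Int) :=
  (PySem.List.pyRange 1 (n+1)).flatMap (fun r => (PySem.List.pyRange 1 (n+1)).map (fun c => (r, c)))

def cellsL (n : Int) : List String := (pairsP n).map (fun p => pole p.1 p.2)

def rowLine (n i : Int) : String :=
  jstr " + " ((PySem.List.pyRange 1 (n+1)).map (fun j => pole i j)) ++ " <= 1\n"
def colLine (n i : Int) : String :=
  jstr " + " ((PySem.List.pyRange 1 (n+1)).map (fun j => pole j i)) ++ " <= 1\n"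
def diagLine (n d : Int) : String :=
  jstr " + " ((PySem.List.pyRange (max 1 (d+1)) (min n (n+d) + 1)).map (fun j => pole j (j - d))) ++ " <= 1\n"
def antiLine (n s : Int) : String :=
  jstr " + " ((PySem.List.pyRange (max 1 (s-n)) (min n (s-1) + 1)).map (fun j => pole j (s - j))) ++ " <= 1\n"

def canon (n : Int) : String :=
  cat (["Maximize \nobj: ", jstr " + " (cellsL n) ++ "\n", "Subject to \n"]
    ++ (PySem.List.pyRange 1 (n+1)).map (rowLine n)
    ++ (PySem.List.pyRange 1 (n+1)).map (colLine n)
    ++ (PySem.List.pyRange (-n+1) n).map (diagLine n)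
    ++ (PySem.List.pyRange 2 (2*n+1)).map (antiLine n)
    ++ ["Bounds \n"]
    ++ (cellsL n).map (fun s => "0 <= " ++ s ++ " <= 1\n")
    ++ ["Generals \n"]
    ++ (cellsL n).map (fun s => s ++ "\n")
    ++ ["End"])

-- generic string lemmas
theorem cat_append (l1 l2 : List String) : cat (l1 ++ l2) = cat l1 ++ cat l2 := by
  induction l1 with
  | nil => simp [cat]
  | cons x t ih => simp [cat, ih, String.append_assoc]

theorem cat_eq_join (l : List String) : PySem.Str.join "" l = cat l := by
  induction l with
  | nil => rfl
  | cons x t ih =>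
    cases t with
    | nil => simp [PySem.Str.join, PySem.Chars.join_singleton, cat, String.append_empty]
    | cons y s =>
      simp only [PySem.Str.join, List.map_cons, PySem.Chars.join_cons_cons,
        String.ofList_append, String.ofList_toList, cat] at *
      rw [ih]
      simp [String.append_empty]

theorem jstr_eq_join (sep : String) (l : List String) : PySem.Str.join sep l = jstr sep l := by
  induction l with
  | nil => simp [PySem.Str.join, PySem.Chars.join_nil, jstr]
  | cons x t ih =>
    cases t with
    | nil => simp [PySem.Str.join, PySem.Chars.join_singleton, jstr]
    | cons y s =>
      simp only [PySem.Str.join, List.map_cons, PySem.Chars.join_cons_cons, jstr,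
        String.ofList_append, String.ofList_toList] at *
      rw [ih]

theorem foldl_str {α : Type} (f : α → String) (l : List α) (init : String) :
    l.foldl (fun acc x => acc ++ f x) init = init ++ cat (l.map f) := by
  induction l generalizing init with
  | nil => simp [cat]
  | cons x t ih => simp [cat, ih, String.append_assoc]

theorem foldl_push {α β : Type} (f : α → β) (l : List α) (init : List β) :
    l.foldl (fun acc x => acc ++ [f x]) init = init ++ l.map f := by
  induction l generalizing init with
  | nil => simp
  | cons x t ih => simp [ih]

theorem cat_flatMap {α : Type} (l : List α) (g : α → List String) :
    cat (l.map (fun x => cat (g x))) = cat (l.flatMap g) := by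
  induction l with
  | nil => simp [cat]
  | cons x t ih => simp [cat, cat_append, ih]

theorem cat_map_iflast {α : Type} [DecidableEq α] (l : List α) (e : α) (he : e ∉ l)
    (f : α → String) (sep tail : String) :
    cat ((l ++ [e]).map (fun x => f x ++ (if x = e then tail else sep)))
      = jstr sep ((l ++ [e]).map f) ++ tail := by
  induction l with
  | nil => simp [cat, jstr, String.append_empty, String.append_assoc]
  | cons x t ih =>
    have hxe : x ≠ e := by intro h; exact he (h ▸ List.mem_cons_self)
    have het : e ∉ t := fun h => he (List.mem_cons_of_mem _ h)
    obtain ⟨y, s, hys⟩ : ∃ y s, (t ++ [e]).map f = y :: s := by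
      cases t <;> simp
    simp only [List.cons_append, List.map_cons, cat, hys, jstr, if_neg hxe]
    rw [ih het]
    simp [hys, jstr, String.append_assoc]

theorem map_shift {α : Type} (a b k : Int) (f : Int → α) :
    (PySem.List.pyRange a b).map (fun i => f (i + k)) = (PySem.List.pyRange (a+k) (b+k)).map f := by
  rw [PySem.List.pyRange_one a b, PySem.List.pyRange_one (a+k) (b+k)]
  have : b + k - (a + k) = b - a := by ring
  rw [this]
  simp only [List.map_map]
  apply List.map_congr_left
  intro m _
  simp only [Function.comp_apply]
  ring_nf

theorem filter_eq_rng (a b t : Int) :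
    (PySem.List.pyRange a b).filter (fun c => c == t) = if a ≤ t ∧ t < b then [t] else [] := by
  rw [List.filter_beq]
  by_cases h : a ≤ t ∧ t < b
  · rw [List.count_eq_one_of_mem (PySem.List.nodup_pyRange_one a b)
      (PySem.List.mem_pyRange_one.mpr h), if_pos h]
    rfl
  · rw [List.count_eq_zero.mpr (fun hm => h (PySem.List.mem_pyRange_one.mp hm)), if_neg h]
    rfl

theorem flatMap_congr_mem {α β : Type} (l : List α) (g h : α → List β)
    (H : ∀ x ∈ l, g x = h x) : l.flatMap g = l.flatMap h := by
  induction l with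
  | nil => rfl
  | cons x t ih =>
    simp only [List.flatMap_cons]
    rw [H x (by simp), ih (fun y hy => H y (by simp [hy]))]

theorem flatMap_single {α β : Type} (l : List α) (f : α → β) :
    l.flatMap (fun x => [f x]) = l.map f := by
  induction l with
  | nil => rfl
  | cons x t ih => simp [ih]

theorem flatMap_ite_singleton {α : Type} (a lo hi b : Int) (p : Int → Prop) [DecidablePred p]
    (F : Int → α) (h1 : a ≤ lo) (h2 : lo ≤ hi) (h3 : hi ≤ b)
    (hp : ∀ r, a ≤ r → r < b → (p r ↔ lo ≤ r ∧ r < hi)) :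
    (PySem.List.pyRange a b).flatMap (fun r => if p r then [F r] else [])
      = (PySem.List.pyRange lo hi).map F := by
  rw [PySem.List.pyRange_one_append a lo b h1 (le_trans h2 h3),
      PySem.List.pyRange_one_append lo hi b h2 h3]
  simp only [List.flatMap_append]
  have e1 : (PySem.List.pyRange a lo).flatMap (fun r => if p r then [F r] else []) = [] := by
    rw [List.flatMap_eq_nil_iff]
    intro r hr
    rcases PySem.List.mem_pyRange_one.mp hr with ⟨hr1, hr2⟩
    rw [if_neg]
    intro hpr
    have := (hp r (by omega) (by omega)).mp hpr
    omega
  have e3 : (PySem.List.pyRange hi b).flatMap (fun r => if p r then [F r] else []) = [] := by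
    rw [List.flatMap_eq_nil_iff]
    intro r hr
    rcases PySem.List.mem_pyRange_one.mp hr with ⟨hr1, hr2⟩
    rw [if_neg]
    intro hpr
    have := (hp r (by omega) (by omega)).mp hpr
    omega
  have e2 : (PySem.List.pyRange lo hi).flatMap (fun r => if p r then [F r] else [])
      = (PySem.List.pyRange lo hi).map F := by
    have : ∀ r ∈ PySem.List.pyRange lo hi, (if p r then [F r] else []) = [F r] := by
      intro r hr
      rcases PySem.List.mem_pyRange_one.mp hr with ⟨hr1, hr2⟩
      rw [if_pos ((hp r (by omega) (by omega)).mpr (by omega))]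
    rw [flatMap_congr_mem _ _ _ this, flatMap_single]
  rw [e1, e2, e3]
  simp

theorem flatMap_if_eq {β : Type} (l : List Int) (hnd : l.Nodup) (k : Int) (hk : k ∈ l)
    (g : Int → List β) :
    l.flatMap (fun r => if r = k then g r else []) = g k := by
  induction l with
  | nil => cases hk
  | cons x t ih =>
    rcases List.nodup_cons.mp hnd with ⟨hx, ht⟩
    simp only [List.flatMap_cons]
    by_cases h : x = k
    · subst h
      rw [if_pos rfl]
      have h0 : t.flatMap (fun r => if r = x then g r else []) = [] := by
        rw [List.flatMap_eq_nil_iff]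
        intro r hr
        rw [if_neg]
        intro he
        exact hx (he ▸ hr)
      simp [h0]
    · have hkt : k ∈ t := by
        rcases List.mem_cons.mp hk with h2 | h2
        · exact absurd h2.symm h
        · exact h2
      rw [if_neg h, ih ht hkt]
      simp

theorem sorted_keys_eq (keys : List Int) (a b : Int) (hnd : keys.Nodup)
    (hmem : ∀ k, k ∈ keys ↔ a ≤ k ∧ k < b) :
    PySem.List.sorted keys (fun x => x) = PySem.List.pyRange a b := by
  apply PySem.List.sorted_eq_of_perm_of_pairwise_lt
  · rw [List.perm_ext_iff_of_nodup (PySem.List.nodup_pyRange_one a b) hnd]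
    intro x
    rw [hmem, PySem.List.mem_pyRange_one]
  · exact PySem.List.pairwise_lt_pyRange_one a b

-- B-side state characterization
abbrev BState : Type :=
  List String × PySem.Dict Int (List String) × PySem.Dict Int (List String) ×
    PySem.Dict Int (List String) × PySem.Dict Int (List String)

def Body (st : BState) (p : Int × Int) : BState :=
  (st.1 ++ [pole p.1 p.2],
   st.2.1.modify p.1 [] (· ++ [pole p.1 p.2]),
   st.2.2.1.modify p.2 [] (· ++ [pole p.1 p.2]),
   st.2.2.2.1.modify (p.1 - p.2) [] (· ++ [pole p.1 p.2]),
   st.2.2.2.2.modify (p.1 + p.2) [] (· ++ [pole p.1 p.2]))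

theorem foldl_nested {σ α β : Type} (l : List α) (m : α → List β) (H : σ → β → σ) (s0 : σ) :
    l.foldl (fun s r => (m r).foldl H s) s0 = (l.flatMap m).foldl H s0 := by
  induction l generalizing s0 with
  | nil => rfl
  | cons x t ih => simp [List.foldl_append, ih]

theorem fold_split (l : List (Int × Int)) (cs : List String)
    (rs os ds asl : PySem.Dict Int (List String)) :
    l.foldl Body ((cs, rs, os, ds, asl) : BState)
      = (l.foldl (fun c p => c ++ [pole p.1 p.2]) cs,
         l.foldl (fun d p => d.modify p.1 [] (· ++ [pole p.1 p.2])) rs,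
         l.foldl (fun d p => d.modify p.2 [] (· ++ [pole p.1 p.2])) os,
         l.foldl (fun d p => d.modify (p.1 - p.2) [] (· ++ [pole p.1 p.2])) ds,
         l.foldl (fun d p => d.modify (p.1 + p.2) [] (· ++ [pole p.1 p.2])) asl) := by
  induction l generalizing cs rs os ds asl with
  | nil => rfl
  | cons x t ih => simp [List.foldl_cons, Body, ih]

def dictOf (n : Int) (key : Int × Int → Int) : PySem.Dict Int (List String) :=
  ((pairsP n).map (fun p => (key p, pole p.1 p.2))).foldl
    (fun d q => d.modify q.1 [] (· ++ [q.2])) PySem.Dict.empty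

theorem dictOf_eq (n : Int) (key : Int × Int → Int) :
    dictOf n key = (pairsP n).foldl
      (fun d p => d.modify (key p) [] (· ++ [pole p.1 p.2])) PySem.Dict.empty := by
  rw [dictOf, List.foldl_map]

theorem st_eq (n : Int) :
    ((PySem.List.pyRange 1 (n+1)).foldl (fun st r =>
      (PySem.List.pyRange 1 (n+1)).foldl (fun st c =>
        let name := "x" ++ PySem.Int.toStr r ++ "_" ++ PySem.Int.toStr c
        (st.1 ++ [name],
         st.2.1.modify r [] (· ++ [name]),
         st.2.2.1.modify c [] (· ++ [name]),
         st.2.2.2.1.modify (r - c) [] (· ++ [name]),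
         st.2.2.2.2.modify (r + c) [] (· ++ [name]))) st)
      (([], PySem.Dict.empty, PySem.Dict.empty, PySem.Dict.empty, PySem.Dict.empty) :
        List String × PySem.Dict Int (List String) × PySem.Dict Int (List String) ×
          PySem.Dict Int (List String) × PySem.Dict Int (List String)))
    = (cellsL n, dictOf n (fun p => p.1), dictOf n (fun p => p.2),
       dictOf n (fun p => p.1 - p.2), dictOf n (fun p => p.1 + p.2)) := by
  have hb : (fun (st : BState) (r : Int) =>
      (PySem.List.pyRange 1 (n+1)).foldl (fun st c =>
        let name := "x" ++ PySem.Int.toStr r ++ "_" ++ PySem.Int.toStr c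
        (st.1 ++ [name],
         st.2.1.modify r [] (· ++ [name]),
         st.2.2.1.modify c [] (· ++ [name]),
         st.2.2.2.1.modify (r - c) [] (· ++ [name]),
         st.2.2.2.2.modify (r + c) [] (· ++ [name]))) st)
      = (fun (st : BState) (r : Int) =>
          ((PySem.List.pyRange 1 (n+1)).map (fun c => (r, c))).foldl Body st) := by
    funext st r
    rw [List.foldl_map]
    rfl
  show (PySem.List.pyRange 1 (n+1)).foldl _ (([], PySem.Dict.empty, PySem.Dict.empty,
    PySem.Dict.empty, PySem.Dict.empty) : BState) = _
  rw [hb, foldl_nested, fold_split]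
  rw [show ((PySem.List.pyRange 1 (n+1)).flatMap fun r =>
      (PySem.List.pyRange 1 (n+1)).map fun c => (r, c)) = pairsP n from rfl]
  rw [foldl_push (fun p : Int × Int => pole p.1 p.2) (pairsP n) []]
  rw [dictOf_eq, dictOf_eq, dictOf_eq, dictOf_eq]
  rfl

theorem mem_keys_dictOf (n : Int) (key : Int × Int → Int) (k : Int) :
    k ∈ (dictOf n key).keys ↔ k ∈ (pairsP n).map key := by
  rw [dictOf, PySem.Dict.keys_foldl_modify_key _ Prod.fst, PySem.Set.mem_update]
  simp [PySem.Dict.keys_empty, List.map_map, Function.comp]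

theorem nodup_keys_dictOf (n : Int) (key : Int × Int → Int) : (dictOf n key).keys.Nodup := by
  rw [dictOf]
  exact PySem.Dict.nodup_keys_foldl_modify_key _ Prod.fst _ _ _
    (by rw [PySem.Dict.keys_empty]; exact List.nodup_nil)

theorem getD_dictOf (n : Int) (key : Int × Int → Int) (k : Int) :
    (dictOf n key).getD k []
      = ((pairsP n).filter (fun p => key p == k)).map (fun p => pole p.1 p.2) := by
  rw [dictOf, PySem.Dict.getD_foldl_modify_append, PySem.Dict.getD_empty]
  simp [List.filter_map, List.map_map, Function.comp_def]

-- key membership ranges (n ≥ 1)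
theorem mem_map_fst (n k : Int) (hn : 1 ≤ n) :
    k ∈ (pairsP n).map (fun p => p.1) ↔ 1 ≤ k ∧ k < n+1 := by
  simp only [pairsP, List.mem_map, List.mem_flatMap, PySem.List.mem_pyRange_one]
  constructor
  · rintro ⟨p, ⟨r, hr, c, hc, rfl⟩, rfl⟩
    exact hr
  · rintro ⟨h1, h2⟩
    exact ⟨(k, 1), ⟨k, ⟨h1, h2⟩, 1, ⟨by omega, by omega⟩, rfl⟩, rfl⟩
theorem mem_map_snd (n k : Int) (hn : 1 ≤ n) :
    k ∈ (pairsP n).map (fun p => p.2) ↔ 1 ≤ k ∧ k < n+1 := by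
  simp only [pairsP, List.mem_map, List.mem_flatMap, PySem.List.mem_pyRange_one]
  constructor
  · rintro ⟨p, ⟨r, hr, c, hc, rfl⟩, rfl⟩
    exact hc
  · rintro ⟨h1, h2⟩
    exact ⟨(1, k), ⟨1, ⟨by omega, by omega⟩, k, ⟨h1, h2⟩, rfl⟩, rfl⟩
theorem mem_map_sub (n k : Int) (hn : 1 ≤ n) :
    k ∈ (pairsP n).map (fun p => p.1 - p.2) ↔ -n+1 ≤ k ∧ k < n := by
  simp only [pairsP, List.mem_map, List.mem_flatMap, PySem.List.mem_pyRange_one]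
  constructor
  · rintro ⟨p, ⟨r, hr, c, hc, rfl⟩, rfl⟩
    constructor <;> omega
  · rintro ⟨h1, h2⟩
    refine ⟨(max 1 (k+1), max 1 (k+1) - k),
      ⟨max 1 (k+1), ⟨by omega, by omega⟩, max 1 (k+1) - k, ⟨by omega, by omega⟩, rfl⟩, ?_⟩
    show max 1 (k+1) - (max 1 (k+1) - k) = k
    omega
theorem mem_map_add (n k : Int) (hn : 1 ≤ n) :
    k ∈ (pairsP n).map (fun p => p.1 + p.2) ↔ 2 ≤ k ∧ k < 2*n+1 := by
  simp only [pairsP, List.mem_map, List.mem_flatMap, PySem.List.mem_pyRange_one]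
  constructor
  · rintro ⟨p, ⟨r, hr, c, hc, rfl⟩, rfl⟩
    constructor <;> omega
  · rintro ⟨h1, h2⟩
    refine ⟨(max 1 (k-n), k - max 1 (k-n)),
      ⟨max 1 (k-n), ⟨by omega, by omega⟩, k - max 1 (k-n), ⟨by omega, by omega⟩, rfl⟩, ?_⟩
    show max 1 (k-n) + (k - max 1 (k-n)) = k
    omega

-- group characterizations
theorem group_rows (n k : Int) (hn : 1 ≤ n) (hk : 1 ≤ k ∧ k < n+1) :
    (dictOf n (fun p => p.1)).getD k [] = (PySem.List.pyRange 1 (n+1)).map (fun c => pole k c) := by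
  rw [getD_dictOf]
  show ((pairsP n).filter (fun p => p.1 == k)).map (fun p => pole p.1 p.2) = _
  rw [pairsP, List.filter_flatMap]
  have step : ∀ r ∈ PySem.List.pyRange 1 (n+1),
      ((PySem.List.pyRange 1 (n+1)).map (fun c => (r, c))).filter (fun p => p.1 == k)
        = if r = k then (PySem.List.pyRange 1 (n+1)).map (fun c => (r, c)) else [] := by
    intro r _
    rw [List.filter_map]
    by_cases h : r = k
    · subst h
      rw [if_pos rfl]
      have hc : ((fun p : Int × Int => p.1 == r) ∘ fun c => (r, c)) = fun _ => true := by
        funext c; simp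
      rw [hc, List.filter_true]
    · rw [if_neg h]
      have hc : ((fun p : Int × Int => p.1 == k) ∘ fun c => (r, c)) = fun _ => false := by
        funext c; simp [h]
      rw [hc, List.filter_false, List.map_nil]
  rw [flatMap_congr_mem _ _ _ step,
    flatMap_if_eq _ (PySem.List.nodup_pyRange_one _ _) k (PySem.List.mem_pyRange_one.mpr hk)]
  simp [List.map_map, Function.comp_def]
theorem group_cols (n k : Int) (hn : 1 ≤ n) (hk : 1 ≤ k ∧ k < n+1) :
    (dictOf n (fun p => p.2)).getD k [] = (PySem.List.pyRange 1 (n+1)).map (fun j => pole j k) := by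
  rw [getD_dictOf]
  show ((pairsP n).filter (fun p => p.2 == k)).map (fun p => pole p.1 p.2) = _
  rw [pairsP, List.filter_flatMap]
  have step : ∀ r ∈ PySem.List.pyRange 1 (n+1),
      ((PySem.List.pyRange 1 (n+1)).map (fun c => (r, c))).filter (fun p => p.2 == k)
        = [(r, k)] := by
    intro r _
    rw [List.filter_map]
    have hc : ((fun p : Int × Int => p.2 == k) ∘ fun c => (r, c)) = fun c => c == k := by
      funext c; simp
    rw [hc, filter_eq_rng, if_pos hk, List.map_cons, List.map_nil]
  rw [flatMap_congr_mem _ _ _ step, flatMap_single]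
  simp [List.map_map, Function.comp_def]
theorem group_diag (n k : Int) (hn : 1 ≤ n) (hk : -n+1 ≤ k ∧ k < n) :
    (dictOf n (fun p => p.1 - p.2)).getD k []
      = (PySem.List.pyRange (max 1 (k+1)) (min n (n+k) + 1)).map (fun j => pole j (j - k)) := by
  rw [getD_dictOf]
  show ((pairsP n).filter (fun p => p.1 - p.2 == k)).map (fun p => pole p.1 p.2) = _
  rw [pairsP, List.filter_flatMap]
  have step : ∀ r ∈ PySem.List.pyRange 1 (n+1),
      ((PySem.List.pyRange 1 (n+1)).map (fun c => (r, c))).filter (fun p => p.1 - p.2 == k)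
        = if 1 ≤ r - k ∧ r - k < n+1 then [(r, r - k)] else [] := by
    intro r _
    rw [List.filter_map]
    have hc : ((fun p : Int × Int => p.1 - p.2 == k) ∘ fun c => (r, c)) = fun c => c == r - k := by
      funext c
      by_cases h : c = r - k
      · subst h
        simp [show r - (r - k) = k by omega]
      · simp [h, show ¬ (r - c = k) by omega]
    rw [hc, filter_eq_rng]
    by_cases h2 : 1 ≤ r - k ∧ r - k < n+1
    · rw [if_pos h2, if_pos h2, List.map_cons, List.map_nil]
    · rw [if_neg h2, if_neg h2, List.map_nil]
  rw [flatMap_congr_mem _ _ _ step,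
    flatMap_ite_singleton 1 (max 1 (k+1)) (min n (n+k) + 1) (n+1)
      (fun r => 1 ≤ r - k ∧ r - k < n+1) (fun r => (r, r - k))
      (by omega) (by omega) (by omega) (by intro r h1 h2; omega)]
  simp [List.map_map, Function.comp_def]
theorem group_anti (n k : Int) (hn : 1 ≤ n) (hk : 2 ≤ k ∧ k < 2*n+1) :
    (dictOf n (fun p => p.1 + p.2)).getD k []
      = (PySem.List.pyRange (max 1 (k-n)) (min n (k-1) + 1)).map (fun j => pole j (k - j)) := by
  rw [getD_dictOf]
  show ((pairsP n).filter (fun p => p.1 + p.2 == k)).map (fun p => pole p.1 p.2) = _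
  rw [pairsP, List.filter_flatMap]
  have step : ∀ r ∈ PySem.List.pyRange 1 (n+1),
      ((PySem.List.pyRange 1 (n+1)).map (fun c => (r, c))).filter (fun p => p.1 + p.2 == k)
        = if 1 ≤ k - r ∧ k - r < n+1 then [(r, k - r)] else [] := by
    intro r _
    rw [List.filter_map]
    have hc : ((fun p : Int × Int => p.1 + p.2 == k) ∘ fun c => (r, c)) = fun c => c == k - r := by
      funext c
      by_cases h : c = k - r
      · subst h
        simp [show r + (k - r) = k by omega]
      · simp [h, show ¬ (r + c = k) by omega]
    rw [hc, filter_eq_rng]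
    by_cases h2 : 1 ≤ k - r ∧ k - r < n+1
    · rw [if_pos h2, if_pos h2, List.map_cons, List.map_nil]
    · rw [if_neg h2, if_neg h2, List.map_nil]
  rw [flatMap_congr_mem _ _ _ step,
    flatMap_ite_singleton 1 (max 1 (k-n)) (min n (k-1) + 1) (n+1)
      (fun r => 1 ≤ k - r ∧ k - r < n+1) (fun r => (r, k - r))
      (by omega) (by omega) (by omega) (by intro r h1 h2; omega)]
  simp [List.map_map, Function.comp_def]

theorem cells_ne_nil (n : Int) (hn : 1 ≤ n) : (cellsL n).isEmpty = false := by
  have hm : pole 1 1 ∈ cellsL n := by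
    rw [cellsL]
    exact List.mem_map.mpr ⟨(1, 1), by
      rw [pairsP]
      exact List.mem_flatMap.mpr ⟨1, PySem.List.mem_pyRange_one.mpr (by omega),
        List.mem_map.mpr ⟨1, PySem.List.mem_pyRange_one.mpr (by omega), rfl⟩⟩, rfl⟩
  rcases h : (cellsL n).isEmpty with _ | _
  · rfl
  · rw [List.isEmpty_iff.mp h] at hm
    cases hm

theorem B_eq_canon (n : Int) (hn : 1 ≤ n) : hetmani_alt n = canon n := by
  simp only [hetmani_alt]
  rw [st_eq]
  simp only []
  rw [cells_ne_nil n hn]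
  rw [sorted_keys_eq _ 1 (n+1) (nodup_keys_dictOf n _)
      (fun k => by rw [mem_keys_dictOf, mem_map_fst n k hn]),
    sorted_keys_eq _ 1 (n+1) (nodup_keys_dictOf n _)
      (fun k => by rw [mem_keys_dictOf, mem_map_snd n k hn]),
    sorted_keys_eq _ (-n+1) n (nodup_keys_dictOf n _)
      (fun k => by rw [mem_keys_dictOf, mem_map_sub n k hn]),
    sorted_keys_eq _ 2 (2*n+1) (nodup_keys_dictOf n _)
      (fun k => by rw [mem_keys_dictOf, mem_map_add n k hn])]
  rw [foldl_push, foldl_push, foldl_push, foldl_push, foldl_push, foldl_push]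
  rw [List.map_congr_left (fun r hr =>
      show PySem.Str.join " + " ((dictOf n (fun p => p.1)).getD r []) ++ " <= 1\n" = rowLine n r by
        rcases PySem.List.mem_pyRange_one.mp hr with ⟨h1, h2⟩
        rw [group_rows n r hn ⟨h1, h2⟩, jstr_eq_join, rowLine]),
    List.map_congr_left (fun c hc =>
      show PySem.Str.join " + " ((dictOf n (fun p => p.2)).getD c []) ++ " <= 1\n" = colLine n c by
        rcases PySem.List.mem_pyRange_one.mp hc with ⟨h1, h2⟩
        rw [group_cols n c hn ⟨h1, h2⟩, jstr_eq_join, colLine]),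
    List.map_congr_left (fun d hd =>
      show PySem.Str.join " + " ((dictOf n (fun p => p.1 - p.2)).getD d []) ++ " <= 1\n" = diagLine n d by
        rcases PySem.List.mem_pyRange_one.mp hd with ⟨h1, h2⟩
        rw [group_diag n d hn ⟨by omega, h2⟩, jstr_eq_join, diagLine]),
    List.map_congr_left (fun k hk =>
      show PySem.Str.join " + " ((dictOf n (fun p => p.1 + p.2)).getD k []) ++ " <= 1\n" = antiLine n k by
        rcases PySem.List.mem_pyRange_one.mp hk with ⟨h1, h2⟩
        rw [group_anti n k hn ⟨h1, h2⟩, jstr_eq_join, antiLine])]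
  rw [cat_eq_join, jstr_eq_join, canon]
  simp [List.append_assoc]

theorem pairs_map {α : Type} (n : Int) (g : Int → Int → α) :
    (PySem.List.pyRange 1 (n+1)).flatMap (fun i => (PySem.List.pyRange 1 (n+1)).map (g i))
      = (pairsP n).map (fun p => g p.1 p.2) := by
  rw [pairsP, List.map_flatMap]
  simp [List.map_map, Function.comp_def]

theorem pairsP_last (n : Int) (hn : 1 ≤ n) :
    ∃ front, pairsP n = front ++ [((n : Int), (n : Int))] ∧ ((n : Int), (n : Int)) ∉ front := by
  refine ⟨(PySem.List.pyRange 1 n).flatMap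
      (fun r => (PySem.List.pyRange 1 n ++ [n]).map (fun c => (r, c)))
      ++ (PySem.List.pyRange 1 n).map (fun c => ((n : Int), c)), ?_, ?_⟩
  · rw [pairsP, PySem.List.pyRange_one_succ_right (by omega : (1:Int) ≤ n), List.flatMap_append,
      List.flatMap_singleton, List.map_append]
    simp [List.append_assoc]
  · intro hm
    rcases List.mem_append.mp hm with h | h
    · rcases List.mem_flatMap.mp h with ⟨r, hr, hp⟩
      rcases List.mem_map.mp hp with ⟨c, _, hc⟩
      have h2 := (PySem.List.mem_pyRange_one.mp hr).2
      have h3 : r = n := congrArg Prod.fst hc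
      omega
    · rcases List.mem_map.mp h with ⟨c, hc, he⟩
      have h2 := (PySem.List.mem_pyRange_one.mp hc).2
      have h3 : c = n := congrArg Prod.snd he
      omega

theorem fold_iflast (f : Int → String) (a b : Int) (h : a ≤ b) (sep tail acc : String) :
    (PySem.List.pyRange a (b+1)).foldl (fun res j => res ++ (f j ++ if j = b then tail else sep)) acc
      = acc ++ (jstr sep ((PySem.List.pyRange a (b+1)).map f) ++ tail) := by
  rw [foldl_str, PySem.List.pyRange_one_succ_right h,
    cat_map_iflast _ b (fun hm => absurd (PySem.List.mem_pyRange_one.mp hm).2 (lt_irrefl b)) f sep tail]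

theorem objA (n : Int) (hn : 1 ≤ n) (init : String) :
    (PySem.List.pyRange 1 (n+1)).foldl (fun result i =>
      (PySem.List.pyRange 1 (n+1)).foldl (fun result j =>
        let result := result ++ pole i j
        if !(i == n && j == n) then result ++ " + " else result ++ "
") result) init
      = init ++ (jstr " + " (cellsL n) ++ "
") := by
  rw [PySem.List.foldl_congr_mem _ _ (fun (acc : String) i =>
      acc ++ cat ((PySem.List.pyRange 1 (n+1)).map
        (fun j => pole i j ++ if (i, j) = ((n : Int), (n : Int)) then "
" else " + "))) init
    (by
      intro acc i _
      rw [PySem.List.foldl_congr_mem _ _ (fun (res : String) j =>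
          res ++ (pole i j ++ if (i, j) = ((n : Int), (n : Int)) then "
" else " + ")) acc
        (by
          intro res j _
          by_cases hi : i = n <;> by_cases hj : j = n <;>
            simp [hi, hj, Prod.ext_iff, String.append_assoc]), foldl_str])]
  rw [foldl_str, cat_flatMap, pairs_map n
    (fun i j => pole i j ++ if (i, j) = ((n : Int), (n : Int)) then "
" else " + ")]
  obtain ⟨front, hsplit, hmem⟩ := pairsP_last n hn
  rw [List.map_congr_left (fun (p : Int × Int) _ =>
    show pole p.1 p.2 ++ (if (p.1, p.2) = ((n : Int), (n : Int)) then "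
" else " + ")
        = pole p.1 p.2 ++ (if p = ((n : Int), (n : Int)) then "
" else " + ") by rw [Prod.mk.eta])]
  rw [hsplit, cat_map_iflast front ((n : Int), (n : Int)) hmem _ " + " "
", ← hsplit]
  rw [cellsL]

theorem rowsA (n : Int) (hn : 1 ≤ n) (init : String) :
    (PySem.List.pyRange 1 (n+1)).foldl (fun result i =>
      (PySem.List.pyRange 1 (n+1)).foldl (fun result j =>
        let result := result ++ pole i j
        if !(j == n) then result ++ " + " else result ++ " <= 1
") result) init
      = init ++ cat ((PySem.List.pyRange 1 (n+1)).map (rowLine n)) := by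
  rw [PySem.List.foldl_congr_mem _ _ (fun (acc : String) i => acc ++ rowLine n i) init
    (by
      intro acc i _
      rw [PySem.List.foldl_congr_mem _ _ (fun (res : String) j =>
          res ++ (pole i j ++ if j = n then " <= 1
" else " + ")) acc
        (by
          intro res j _
          by_cases hj : j = n <;> simp [hj, String.append_assoc])]
      rw [fold_iflast (pole i) 1 n hn " + " " <= 1
" acc]
      rfl), foldl_str]

theorem colsA (n : Int) (hn : 1 ≤ n) (init : String) :
    (PySem.List.pyRange 1 (n+1)).foldl (fun result i =>
      (PySem.List.pyRange 1 (n+1)).foldl (fun result j =>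
        let result := result ++ pole j i
        if !(j == n) then result ++ " + " else result ++ " <= 1
") result) init
      = init ++ cat ((PySem.List.pyRange 1 (n+1)).map (colLine n)) := by
  rw [PySem.List.foldl_congr_mem _ _ (fun (acc : String) i => acc ++ colLine n i) init
    (by
      intro acc i _
      rw [PySem.List.foldl_congr_mem _ _ (fun (res : String) j =>
          res ++ ((fun j => pole j i) j ++ if j = n then " <= 1
" else " + ")) acc
        (by
          intro res j _
          by_cases hj : j = n <;> simp [hj, String.append_assoc])]
      rw [fold_iflast (fun j => pole j i) 1 n hn " + " " <= 1
" acc]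
      rfl), foldl_str]

theorem diagA (n : Int) (hn : 1 ≤ n) (init : String) :
    (PySem.List.pyRange (-n+1) n).foldl (fun result i =>
      (if i ≤ 0 then
        (PySem.List.pyRange 1 (n+i+1)).foldl (fun result j =>
          let result := result ++ pole j (j - i)
          if j != n + i then result ++ " + " else result) result
       else
        (PySem.List.pyRange (i+1) (n+1)).foldl (fun result j =>
          let result := result ++ pole j (j - i)
          if j != n then result ++ " + " else result) result) ++ " <= 1
") init
      = init ++ cat ((PySem.List.pyRange (-n+1) n).map (diagLine n)) := by
  rw [PySem.List.foldl_congr_mem _ _ (fun (acc : String) i => acc ++ diagLine n i) init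
    (by
      intro acc i hi
      rcases PySem.List.mem_pyRange_one.mp hi with ⟨h1, h2⟩
      show _ = acc ++ diagLine n i
      by_cases h : i ≤ 0
      · rw [if_pos h]
        rw [PySem.List.foldl_congr_mem _ _ (fun (res : String) j =>
            res ++ ((fun j => pole j (j - i)) j ++ if j = n + i then "" else " + ")) acc
          (by
            intro res j _
            by_cases hj : j = n + i <;>
              simp [hj, String.append_assoc, String.append_empty])]
        rw [show n + i + 1 = (n + i) + 1 from rfl,
          fold_iflast (fun j => pole j (j - i)) 1 (n+i) (by omega) " + " "" acc]
        simp only [diagLine]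
        rw [show max 1 (i+1) = 1 by omega, show min n (n+i) = n + i by omega]
        simp [String.append_assoc, String.append_empty]
      · rw [if_neg h]
        rw [PySem.List.foldl_congr_mem _ _ (fun (res : String) j =>
            res ++ ((fun j => pole j (j - i)) j ++ if j = n then "" else " + ")) acc
          (by
            intro res j _
            by_cases hj : j = n <;>
              simp [hj, String.append_assoc, String.append_empty])]
        rw [fold_iflast (fun j => pole j (j - i)) (i+1) n (by omega) " + " "" acc]
        simp only [diagLine]
        rw [show max 1 (i+1) = i + 1 by omega, show min n (n+i) = n by omega]
        simp [String.append_assoc, String.append_empty]), foldl_str]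

theorem antiA (n : Int) (hn : 1 ≤ n) (init : String) :
    (PySem.List.pyRange (-n+1) n).foldl (fun result i =>
      (if i ≤ 0 then
        (PySem.List.pyRange 1 (n+i+1)).foldl (fun result j =>
          let result := result ++ pole j (i - j + n + 1)
          if j != n + i then result ++ " + " else result) result
       else
        (PySem.List.pyRange (i+1) (n+1)).foldl (fun result j =>
          let result := result ++ pole j (i - j + n + 1)
          if j != n then result ++ " + " else result) result) ++ " <= 1
") init
      = init ++ cat ((PySem.List.pyRange 2 (2*n+1)).map (antiLine n)) := by
  rw [PySem.List.foldl_congr_mem _ _ (fun (acc : String) i => acc ++ antiLine n (i + (n+1))) init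
    (by
      intro acc i hi
      rcases PySem.List.mem_pyRange_one.mp hi with ⟨h1, h2⟩
      show _ = acc ++ antiLine n (i + (n+1))
      by_cases h : i ≤ 0
      · rw [if_pos h]
        rw [PySem.List.foldl_congr_mem _ _ (fun (res : String) j =>
            res ++ ((fun j => pole j (i + (n+1) - j)) j ++ if j = n + i then "" else " + ")) acc
          (by
            intro res j _
            rw [show i - j + n + 1 = i + (n+1) - j by ring]
            by_cases hj : j = n + i <;>
              simp [hj, String.append_assoc, String.append_empty])]
        rw [show n + i + 1 = (n + i) + 1 from rfl,
          fold_iflast (fun j => pole j (i + (n+1) - j)) 1 (n+i) (by omega) " + " "" acc]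
        simp only [antiLine]
        rw [show max 1 (i + (n+1) - n) = 1 by omega,
          show min n (i + (n+1) - 1) = n + i by omega]
        simp [String.append_assoc, String.append_empty]
      · rw [if_neg h]
        rw [PySem.List.foldl_congr_mem _ _ (fun (res : String) j =>
            res ++ ((fun j => pole j (i + (n+1) - j)) j ++ if j = n then "" else " + ")) acc
          (by
            intro res j _
            rw [show i - j + n + 1 = i + (n+1) - j by ring]
            by_cases hj : j = n <;>
              simp [hj, String.append_assoc, String.append_empty])]
        rw [fold_iflast (fun j => pole j (i + (n+1) - j)) (i+1) n (by omega) " + " "" acc]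
        simp only [antiLine]
        rw [show max 1 (i + (n+1) - n) = i + 1 by omega,
          show min n (i + (n+1) - 1) = n by omega]
        simp [String.append_assoc, String.append_empty]), foldl_str]
  rw [map_shift (-n+1) n (n+1) (antiLine n), show -n+1+(n+1) = 2 by ring, show n+(n+1) = 2*n+1 by ring]

theorem boundsA (n : Int) (init : String) :
    (PySem.List.pyRange 1 (n+1)).foldl (fun result i =>
      (PySem.List.pyRange 1 (n+1)).foldl (fun result j =>
        result ++ "0 <= " ++ pole i j ++ " <= 1
") result) init
      = init ++ cat ((cellsL n).map (fun s => "0 <= " ++ s ++ " <= 1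
")) := by
  rw [PySem.List.foldl_congr_mem _ _ (fun (acc : String) i =>
      acc ++ cat ((PySem.List.pyRange 1 (n+1)).map (fun j => "0 <= " ++ pole i j ++ " <= 1
"))) init
    (by
      intro acc i _
      rw [PySem.List.foldl_congr_mem _ _ (fun (res : String) j =>
          res ++ ("0 <= " ++ pole i j ++ " <= 1
")) acc
        (by intro res j _; simp [String.append_assoc]), foldl_str])]
  rw [foldl_str, cat_flatMap, pairs_map n (fun i j => "0 <= " ++ pole i j ++ " <= 1
"), cellsL,
    List.map_map]
  rfl

theorem gensA (n : Int) (init : String) :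
    (PySem.List.pyRange 1 (n+1)).foldl (fun result i =>
      (PySem.List.pyRange 1 (n+1)).foldl (fun result j =>
        result ++ pole i j ++ "
") result) init
      = init ++ cat ((cellsL n).map (fun s => s ++ "
")) := by
  rw [PySem.List.foldl_congr_mem _ _ (fun (acc : String) i =>
      acc ++ cat ((PySem.List.pyRange 1 (n+1)).map (fun j => pole i j ++ "
"))) init
    (by
      intro acc i _
      rw [PySem.List.foldl_congr_mem _ _ (fun (res : String) j =>
          res ++ (pole i j ++ "
")) acc
        (by intro res j _; simp [String.append_assoc]), foldl_str])]
  rw [foldl_str, cat_flatMap, pairs_map n (fun i j => pole i j ++ "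
"), cellsL, List.map_map]
  rfl

theorem A_eq_canon (n : Int) (hn : 1 ≤ n) : hetmani n = canon n := by
  simp only [hetmani]
  rw [objA n hn, rowsA n hn, colsA n hn, diagA n hn, antiA n hn, boundsA n, gensA n]
  rw [canon]
  simp [cat_append, cat, ← String.append_assoc, String.append_empty]

theorem small_case (n : Int) (hn : n ≤ 0) : hetmani n = hetmani_alt n := by
  have e1 : PySem.List.pyRange 1 (n+1) = [] := PySem.List.pyRange_one_eq_nil (by omega)
  have e2 : PySem.List.pyRange (-n+1) n = [] := PySem.List.pyRange_one_eq_nil (by omega)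
  simp only [hetmani, hetmani_alt, e1, e2, List.foldl_nil, PySem.Dict.keys_empty]
  rfl

-- ===== VERDICT (by name: the statement is the Claim_ definition above) =====
theorem hetmani_spec : Claim_equal_hetmani := by
  intro n _
  unfold Spec_hetmani
  by_cases h : n ≤ 0
  · exact small_case n h
  · rw [A_eq_canon n (by omega), B_eq_canon n (by omega)]
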